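-- pv_equiv track=rewrite | github.com/ZDCSlab/Group-Adaptive-Elicitation | src/inference_dist/impute.py | impute_mode
-- ===== SOURCE A (Python) =====
-- from collections import Counter, defaultdict
-- from typing import Dict, Hashable, Iterable, List, Optional, Tuple
-- from typing import Dict, Hashable, Mapping, Optional, List
--
-- NodeId = Hashable
--
-- def impute_mode(samples: List[Dict[NodeId, int]]) -> Dict[NodeId, int]:
--     """
--     Alg 3: return y_hat^G by taking the majority label at each node
--     from the empirical distribution D produced by Gibbs (Alg 2).
--     """
--     if not samples:
--         raise ValueError("Empty samples for imputation.")
--     nodes = list(samples[0].keys())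
--     y_hat: Dict[NodeId, int] = {}
--     for v in nodes:
--         counts = Counter(s[v] for s in samples)
--         # deterministic tie-break: smallest label wins
--         y_hat[v] = min([lab for lab, cnt in counts.items() if cnt == max(counts.values())])
--     return y_hat
-- ===== SOURCE B (Python) =====
-- from typing import Dict, Hashable, List
--
-- NodeId = Hashable
--
-- def impute_mode(samples: List[Dict[NodeId, int]]) -> Dict[NodeId, int]:
--     if not samples:
--         raise ValueError("Empty samples for imputation.")
--     nodes = list(samples[0].keys())
--     y_hat: Dict[NodeId, int] = {}
--     for v in nodes:
--         # mode by sort-then-run-scan: equal labels are adjacent after sorting,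
--         # so one scan tracking the current run length finds the longest run;
--         # '>' (strict) keeps the first (= smallest) label among tied runs.
--         vals = sorted(s[v] for s in samples)
--         best_lab = vals[0]
--         best_cnt = 0
--         run_cnt = 0
--         prev = None
--         for x in vals:
--             run_cnt = run_cnt + 1 if x == prev else 1
--             prev = x
--             if run_cnt > best_cnt:
--                 best_cnt = run_cnt
--                 best_lab = x
--         y_hat[v] = best_lab
--     return y_hat
-- ===== Notes on version B (the rewrite author's own statement) =====
-- stated objective: alternative
-- what changed: A counts labels per node with a Counter, then filters for labels whose count equals the max and takes the min; B uses no counting table at all: it sorts each node's labels and finds the mode by a single run-length scan over the sorted list, where the strict '>' update makes the first (smallest) label of the longest runs win.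
-- outside the precondition, e.g. on impute_mode([]): A raises ValueError, B raises ValueError; on impute_mode([{'a': 1}, {'b': 2}]): A raises KeyError, B raises KeyError
import Mathlib
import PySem

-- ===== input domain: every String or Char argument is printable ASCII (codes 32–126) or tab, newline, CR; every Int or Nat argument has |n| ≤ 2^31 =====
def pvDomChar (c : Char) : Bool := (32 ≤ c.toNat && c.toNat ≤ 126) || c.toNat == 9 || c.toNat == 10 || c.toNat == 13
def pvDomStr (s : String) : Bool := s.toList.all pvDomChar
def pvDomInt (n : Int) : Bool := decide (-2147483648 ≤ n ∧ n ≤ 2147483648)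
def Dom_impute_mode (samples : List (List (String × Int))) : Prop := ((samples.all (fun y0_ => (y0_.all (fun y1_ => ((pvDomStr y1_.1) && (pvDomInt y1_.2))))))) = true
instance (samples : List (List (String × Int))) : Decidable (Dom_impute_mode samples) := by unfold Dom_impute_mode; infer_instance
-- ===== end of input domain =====

-- B replaces A's Counter-and-filter mode computation by sorting each node's labels and
-- finding the mode with a single run-length scan over the sorted list (objective: alternative).

-- ===== PORT A =====
-- dict lookup s[v]: first match in insertion order; 0 stands where Python raises KeyError (excluded by Pre_)
def pvLookup (s : List (String × Int)) (v : String) : Int :=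
  ((s.find? (fun p => p.1 == v)).map Prod.snd).getD 0

-- Counter(s[v] for s in samples); then min of labels whose count equals max(counts.values())
-- (the .getD defaults are unreachable: the values list is nonempty whenever samples is)
def pvModeA (vals : List Int) : Int :=
  let counts := PySem.Dict.counter vals
  let mx := (PySem.List.max? counts.values (fun x => x)).getD 0
  (PySem.List.min? ((counts.items.filter (fun p => p.2 == mx)).map Prod.fst) (fun x => x)).getD 0

def impute_mode (samples : List (List (String × Int))) : List (String × Int) :=
  match samples with
  | [] => []   -- Python raises ValueError here (outside Pre_)
  | s0 :: _ =>
    let nodes := PySem.Set.ofList (s0.map Prod.fst)   -- list(samples[0].keys())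
    (nodes.foldl (fun y v => y.insert v (pvModeA (samples.map (fun s => pvLookup s v)))) PySem.Dict.empty).items

-- ===== PORT B =====
-- scan state: best_lab, best_cnt, prev, run_cnt
structure PvSt where
  bl : Int
  bc : Int
  prev : Option Int
  rc : Int
deriving Repr, DecidableEq

-- loop body: run_cnt = run_cnt+1 if x == prev else 1; prev = x; if run_cnt > best_cnt: update
def pvStep (st : PvSt) (x : Int) : PvSt :=
  let rc := if st.prev = some x then st.rc + 1 else 1
  if st.bc < rc then ⟨x, rc, some x, rc⟩ else ⟨st.bl, st.bc, some x, rc⟩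

-- vals = sorted(labels); run-length scan of the sorted list (vals[0] default unreachable: vals nonempty)
def pvModeB (labels : List Int) : Int :=
  let vals := PySem.List.sorted labels (fun x => x)
  (vals.foldl pvStep ⟨(PySem.List.pyGet? vals 0).getD 0, 0, none, 0⟩).bl

def impute_mode_alt (samples : List (List (String × Int))) : List (String × Int) :=
  match samples with
  | [] => []   -- Python raises ValueError here (outside Pre_)
  | s0 :: _ =>
    let nodes := PySem.Set.ofList (s0.map Prod.fst)
    (nodes.foldl (fun y v => y.insert v (pvModeB (samples.map (fun s => pvLookup s v)))) PySem.Dict.empty).items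

-- ===== PRECONDITION & SPEC =====
-- A raises ValueError on empty samples and KeyError when a node of samples[0] is missing in some sample; exactly those are excluded.
def Pre_impute_mode (samples : List (List (String × Int))) : Prop :=
  samples ≠ [] ∧ ∀ s ∈ samples, ∀ p ∈ samples.headD [], p.1 ∈ s.map Prod.fst
instance (samples : List (List (String × Int))) : Decidable (Pre_impute_mode samples) := by unfold Pre_impute_mode; infer_instance
def pvWitness_impute_mode : (List (List (String × Int))) := [[("a", 1), ("b", 2)], [("a", 1), ("b", 3)]]

def Spec_impute_mode (samples : List (List (String × Int))) (out : List (String × Int)) : Prop := out = impute_mode_alt samples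
instance (samples : List (List (String × Int))) (out : List (String × Int)) : Decidable (Spec_impute_mode samples out) := by unfold Spec_impute_mode; infer_instance

-- ===== CLAIM =====
def Claim_equal_impute_mode : Prop := ∀ (samples : List (List (String × Int))), Dom_impute_mode samples → Pre_impute_mode samples → Spec_impute_mode samples (impute_mode samples)

-- ===== LEMMAS AND PROOFS =====

-- b is THE mode of l with the smallest-label tie-break, and c its count
def pvIsMode (l : List Int) (b c : Int) : Prop :=
  b ∈ l ∧ (l.count b : Int) = c ∧ (∀ y ∈ l, (l.count y : Int) ≤ c) ∧ (∀ y ∈ l, (l.count y : Int) = c → b ≤ y)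

theorem pvIsMode_unique {l : List Int} {b₁ c₁ b₂ c₂ : Int}
    (h₁ : pvIsMode l b₁ c₁) (h₂ : pvIsMode l b₂ c₂) : b₁ = b₂ := by
  obtain ⟨m₁, e₁, mx₁, mn₁⟩ := h₁
  obtain ⟨m₂, e₂, mx₂, mn₂⟩ := h₂
  have hc : c₁ = c₂ := le_antisymm (e₁ ▸ mx₂ b₁ m₁) (e₂ ▸ mx₁ b₂ m₂)
  exact le_antisymm (mn₁ b₂ m₂ (by rw [e₂, hc])) (mn₂ b₁ m₁ (by rw [e₁, ← hc]))

-- A's Counter-filter-min computation satisfies pvIsMode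
theorem pvModeA_isMode (l : List Int) (hl : l ≠ []) :
    pvIsMode l (pvModeA l) ((l.count (pvModeA l) : Int)) := by
  have hvals : (PySem.Dict.counter l).values
      = (PySem.Set.ofList l).map (fun k => ((l.count k : Int))) := by
    simp [PySem.Dict.values, PySem.Dict.items_counter, Function.comp]
  have hne : PySem.Set.ofList l ≠ [] := by
    obtain ⟨x, hx⟩ := List.exists_mem_of_ne_nil l hl
    intro h
    have := (PySem.Set.mem_ofList l x).mpr hx
    simp [h] at this
  -- max? is some
  obtain ⟨m, hm⟩ : ∃ m, PySem.List.max? (PySem.Dict.counter l).values (fun x => x) = some m := by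
    cases h : PySem.List.max? (PySem.Dict.counter l).values (fun x => x) with
    | none =>
      rw [PySem.List.max?_eq_none_iff, hvals, List.map_eq_nil_iff] at h
      exact absurd h hne
    | some m => exact ⟨m, rfl⟩
  have hmmem := PySem.List.max?_mem hm
  have hmmax := PySem.List.max?_isMax hm
  rw [hvals] at hmmem hmmax
  obtain ⟨k, hk, hkm⟩ := List.mem_map.mp hmmem
  -- the filtered label list is nonempty : k is in it
  set flt := ((PySem.Dict.counter l).items.filter (fun p => p.2 == m)).map Prod.fst with hflt
  have hkflt : k ∈ flt := by
    rw [hflt]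
    refine List.mem_map.mpr ⟨(k, (l.count k : Int)), List.mem_filter.mpr ⟨?_, by simp [hkm]⟩, rfl⟩
    rw [PySem.Dict.items_counter]
    exact List.mem_map.mpr ⟨k, hk, rfl⟩
  obtain ⟨b, hb⟩ : ∃ b, PySem.List.min? flt (fun x => x) = some b := by
    cases h : PySem.List.min? flt (fun x => x) with
    | none =>
      rw [PySem.List.min?_eq_none_iff] at h
      rw [h] at hkflt; cases hkflt
    | some b => exact ⟨b, rfl⟩
  have hbmem := PySem.List.min?_mem hb
  have hbmin := PySem.List.min?_isMin hb
  -- unpack b's membership: b ∈ ofList l with count b = m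
  obtain ⟨p, hpf, hpb⟩ := List.mem_map.mp hbmem
  have hpitems := (List.mem_filter.mp hpf).1
  have hpm : p.2 == m := (List.mem_filter.mp hpf).2
  rw [PySem.Dict.items_counter] at hpitems
  obtain ⟨k', hk', hkp⟩ := List.mem_map.mp hpitems
  have hbl : b ∈ l := by
    rw [← hpb, ← hkp]
    exact (PySem.Set.mem_ofList l k').mp hk'
  have hcntb : ((l.count b : Int)) = m := by
    have : p.2 = m := by simpa using hpm
    rw [← hpb, ← hkp] at *
    simpa using this
  have hres : pvModeA l = b := by
    simp only [pvModeA]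
    rw [hm]
    simp only [Option.getD_some]
    rw [hb]
    rfl
  rw [hres]
  refine ⟨hbl, rfl, ?_, ?_⟩
  · intro y hy
    rw [hcntb]
    exact hmmax _ (List.mem_map.mpr ⟨y, (PySem.Set.mem_ofList l y).mpr hy, rfl⟩)
  · intro y hy hcy
    refine hbmin y ?_
    rw [hflt]
    refine List.mem_map.mpr ⟨(y, (l.count y : Int)), List.mem_filter.mpr ⟨?_, by simp [hcy, hcntb]⟩, rfl⟩
    rw [PySem.Dict.items_counter]
    exact List.mem_map.mpr ⟨y, (PySem.Set.mem_ofList l y).mpr hy, rfl⟩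

-- B's run-length scan over the sorted list: loop invariant, then the result satisfies pvIsMode
theorem pv_scan_inv (r : List Int) (p : List Int) (st : PvSt)
    (hs : (p ++ r).Pairwise (· ≤ ·))
    (hm : ∃ m, st.prev = some m ∧ m ∈ p ∧ (∀ y ∈ p, y ≤ m) ∧ ((p.count m : Int)) = st.rc)
    (hmode : pvIsMode p st.bl st.bc) :
    pvIsMode (p ++ r) (r.foldl pvStep st).bl (r.foldl pvStep st).bc := by
  induction r generalizing p st with
  | nil => simpa using hmode
  | cons x r' ih =>
    obtain ⟨m, hprev, hmp, hmmax, hmrc⟩ := hm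
    obtain ⟨hbl_mem, hbl_cnt, hbc_max, hbl_min⟩ := hmode
    have hax : ∀ y ∈ p, y ≤ x :=
      fun y hy => (List.pairwise_append.mp hs).2.2 y hy x (List.mem_cons_self)
    have hs' : ((p ++ [x]) ++ r').Pairwise (· ≤ ·) := by
      simpa [List.append_assoc] using hs
    have key : p ++ x :: r' = (p ++ [x]) ++ r' := by simp
    have hcnt : ∀ y : Int, y ≠ x → (p ++ [x]).count y = p.count y := by
      intro y h
      have h0 : List.count y [x] = 0 := List.count_eq_zero.mpr (by simp [h])
      rw [List.count_append, h0, Nat.add_zero]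
    have hmem : ∀ y : Int, y ∈ p ++ [x] ↔ y ∈ p ∨ y = x := by intro y; simp
    -- abbreviate the new run count
    set c : Int := if st.prev = some x then st.rc + 1 else 1 with hc
    have hstep : pvStep st x = if st.bc < c then ⟨x, c, some x, c⟩ else ⟨st.bl, st.bc, some x, c⟩ := by
      simp only [pvStep, hc]
    have hcx : (((p ++ [x]).count x : Int)) = c := by
      rw [hc, List.count_append]
      by_cases hxm : m = x
      · have hpx : st.prev = some x := by rw [hprev, hxm]
        rw [if_pos hpx, ← hmrc, hxm]
        push_cast [List.count_singleton]
        simp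
      · have hxnp : x ∉ p := by
          intro hxp
          exact hxm (le_antisymm (hax m hmp) (hmmax x hxp))
        have hpx : ¬ st.prev = some x := by rw [hprev]; simpa using hxm
        rw [if_neg hpx, List.count_eq_zero_of_not_mem hxnp]
        simp
      -- note: x ∈ p → x = m since x bounds p above and m is a bound attained in p
    rw [key, List.foldl_cons]
    apply ih (p ++ [x]) (pvStep st x) hs'
    · refine ⟨x, ?_, by simp, ?_, ?_⟩
      · rw [hstep]; split <;> rfl
      · intro y hy
        rcases (hmem y).mp hy with h | h
        · exact hax y h
        · exact le_of_eq h
      · have hr : (pvStep st x).rc = c := by rw [hstep]; split <;> rfl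
        rw [hr, hcx]
    · by_cases hup : st.bc < c
      · have h1 : (pvStep st x).bl = x := by rw [hstep, if_pos hup]
        have h2 : (pvStep st x).bc = c := by rw [hstep, if_pos hup]
        rw [h1, h2]
        refine ⟨by simp, hcx, ?_, ?_⟩
        · intro y hy
          by_cases hyx : y = x
          · rw [hyx, hcx]
          · rw [hcnt y hyx]
            rcases (hmem y).mp hy with h | h
            · exact le_of_lt (lt_of_le_of_lt (hbc_max y h) hup)
            · exact absurd h hyx
        · intro y hy hyc
          by_cases hyx : y = x
          · exact le_of_eq hyx.symm
          · rw [hcnt y hyx] at hyc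
            rcases (hmem y).mp hy with h | h
            · exact absurd hyc (by have := hbc_max y h; omega)
            · exact absurd h hyx
      · have h1 : (pvStep st x).bl = st.bl := by rw [hstep, if_neg hup]
        have h2 : (pvStep st x).bc = st.bc := by rw [hstep, if_neg hup]
        rw [not_lt] at hup
        have hblx : st.bl ≠ x := by
          intro hbx
          have hxp : x ∈ p := hbx ▸ hbl_mem
          have hxm : x = m := le_antisymm (hmmax x hxp) (hax m hmp)
          have hpx : st.prev = some x := by rw [hprev, hxm]
          have : c = st.rc + 1 := by rw [hc, if_pos hpx]
          have hbceq : st.bc = st.rc := by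
            rw [← hbl_cnt, hbx, hxm, hmrc]
          omega
        rw [h1, h2]
        refine ⟨(hmem st.bl).mpr (Or.inl hbl_mem), by rw [hcnt st.bl hblx]; exact hbl_cnt, ?_, ?_⟩
        · intro y hy
          by_cases hyx : y = x
          · rw [hyx, hcx]; exact hup
          · rw [hcnt y hyx]
            rcases (hmem y).mp hy with h | h
            · exact hbc_max y h
            · exact absurd h hyx
        · intro y hy hyc
          by_cases hyx : y = x
          · exact hyx ▸ hax st.bl hbl_mem
          · rw [hcnt y hyx] at hyc
            rcases (hmem y).mp hy with h | h
            · exact hbl_min y h hyc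
            · exact absurd h hyx

theorem pvModeB_isMode (l : List Int) (hl : l ≠ []) :
    pvIsMode l (pvModeB l) ((l.count (pvModeB l) : Int)) := by
  have hperm : (PySem.List.sorted l (fun x => x)).Perm l := PySem.List.sorted_perm l (fun x => x) false
  have hsne : PySem.List.sorted l (fun x => x) ≠ [] := by
    intro h
    exact hl (by rwa [PySem.List.sorted_eq_nil_iff] at h)
  obtain ⟨v0, vt, hv⟩ := List.exists_cons_of_ne_nil hsne
  have hpw := PySem.List.sorted_pairwise l (fun x => x)
  rw [hv] at hpw
  have hfirst : pvStep ⟨(PySem.List.pyGet? (PySem.List.sorted l (fun x => x)) 0).getD 0, 0, none, 0⟩ v0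
      = ⟨v0, 1, some v0, 1⟩ := by
    simp [pvStep]
  have hinv := pv_scan_inv vt [v0] ⟨v0, 1, some v0, 1⟩
      (by simpa using hpw)
      ⟨v0, rfl, by simp, by simp, by simp⟩
      ⟨by simp, by simp, by simp, by simp⟩
  have hres : pvModeB l = (vt.foldl pvStep ⟨v0, 1, some v0, 1⟩).bl := by
    simp only [pvModeB]
    rw [hv, List.foldl_cons]
    rw [hv] at hfirst
    rw [hfirst]
  have hsv : [v0] ++ vt = PySem.List.sorted l (fun x => x) := by rw [hv]; rfl
  rw [hsv] at hinv
  obtain ⟨h1, h2, h3, h4⟩ := hinv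
  have hcnt : ∀ y : Int, (PySem.List.sorted l (fun x => x)).count y = l.count y :=
    fun y => hperm.count_eq y
  rw [hcnt] at h2
  rw [hres]
  have hbc : ((l.count ((vt.foldl pvStep ⟨v0, 1, some v0, 1⟩).bl) : Int))
      = (vt.foldl pvStep ⟨v0, 1, some v0, 1⟩).bc := h2
  refine ⟨(hperm.mem_iff).mp h1, rfl, ?_, ?_⟩
  · intro y hy
    have := h3 y ((hperm.mem_iff).mpr hy)
    rw [hcnt] at this
    rw [hbc]
    exact this
  · intro y hy hyc
    refine h4 y ((hperm.mem_iff).mpr hy) ?_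
    rw [hcnt, hyc, hbc]

theorem pvMode_eq (l : List Int) (hl : l ≠ []) : pvModeA l = pvModeB l :=
  pvIsMode_unique (pvModeA_isMode l hl) (pvModeB_isMode l hl)

-- ===== VERDICT =====
theorem impute_mode_spec : Claim_equal_impute_mode := by
  intro samples _ _
  unfold Spec_impute_mode impute_mode impute_mode_alt
  cases samples with
  | nil => rfl
  | cons s0 rest =>
    simp only
    rw [PySem.Dict.items_foldl_insert_fresh (PySem.Set.ofList (s0.map Prod.fst))
          (fun v => v) (fun v => pvModeA ((s0 :: rest).map (fun s => pvLookup s v))) PySem.Dict.empty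
          (fun a _ => PySem.Dict.contains_empty a) (by simp [PySem.Set.nodup_ofList]),
        PySem.Dict.items_foldl_insert_fresh (PySem.Set.ofList (s0.map Prod.fst))
          (fun v => v) (fun v => pvModeB ((s0 :: rest).map (fun s => pvLookup s v))) PySem.Dict.empty
          (fun a _ => PySem.Dict.contains_empty a) (by simp [PySem.Set.nodup_ofList])]
    refine congrArg _ (List.map_congr_left (fun v hv => ?_))
    simp only [Prod.mk.injEq, true_and]
    exact pvMode_eq _ (by simp)
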